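-- pv_equiv track=rewrite | github.com/Cheza00/university-portfolio | bachelor-progettazione-di-algoritmi/v2_memoization.py | pathsCount_DP
-- ===== SOURCE A (Python) =====
-- def pathsCount_DP(n, k):
--     if k == 0:
--         return 0
--     if k == 1:
--         return 2
--     if k > 2*n-3:
--         k = 2*n-3
--     M = [[[[-1 for _ in range(2)]
--             for _ in range(k)]
--             for _ in range(n)]
--             for _ in range(n)]
--     return PathsForK_DP(n, 1, 0, k, 1, M) + PathsForK_DP(n, 0, 1, k, 0, M)
--
-- def PathsForK_DP(n, i, j, k, direction, M):
--     if i >= n or j >= n: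
--         return 0
--     if i == n-1 and j == n-1:
--         return 1
--     if (k == 0):
--         if ((direction == 1 and j == n-1) or
--             (direction == 0 and i == n-1)):
--             return 1
--         else:
--             return 0
--     if M[i][j][k-1][direction] != -1:
--         return M[i][j][k-1][direction]
--     if direction == 1:
--         M[i][j][k-1][direction] = (PathsForK_DP(n, i + 1, j, k, direction, M) +
--                                    PathsForK_DP(n, i, j + 1, k - 1, 0, M))
--         return M[i][j][k-1][direction]
--     else:
--         M[i][j][k-1][direction] = (PathsForK_DP(n, i, j + 1, k, direction, M) +
--                                    PathsForK_DP(n, i + 1, j, k - 1, 1, M))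
--         return M[i][j][k-1][direction]
-- ===== SOURCE B (Python) =====
-- def pathsCount_DP(n, k):
--     # Bottom-up layered DP: D[c][i][j] / R[c][i][j] = paths from (i,j) heading
--     # down / right with at most c remaining direction changes; layers built
--     # iteratively (rows bottom-up, columns right-to-left) instead of memoized
--     # top-down recursion.
--     if k == 0:
--         return 0
--     if k == 1:
--         return 2
--     if n < 2:
--         return 0
--     k = min(k, 2 * n - 3)
--     # layer c = 0: must run straight to the goal
--     D = [[1 if j == n - 1 else 0 for j in range(n)] for _ in range(n)]
--     R = [[1 if i == n - 1 else 0 for _ in range(n)] for i in range(n)]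
--     for _c in range(k):
--         nD, nR = [], []
--         for i in range(n - 1, -1, -1):
--             rowD, rowR = [], []
--             for j in range(n - 1, -1, -1):
--                 if i == n - 1 and j == n - 1:
--                     dv = rv = 1
--                 else:
--                     dv = (nD[0][j] if nD else 0) + (R[i][j + 1] if j + 1 < n else 0)
--                     rv = (rowR[0] if rowR else 0) + (D[i + 1][j] if i + 1 < n else 0)
--                 rowD.insert(0, dv)
--                 rowR.insert(0, rv)
--             nD.insert(0, rowD)
--             nR.insert(0, rowR)
--         D, R = nD, nR
--     return D[1][0] + R[0][1]
-- ===== Notes on version B (the rewrite author's own statement) =====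
-- stated objective: alternative
-- what changed: Replaced the top-down memoized recursion over a mutable 4-D table by a bottom-up layered DP that iterates the clamped k layers, each layer built row-by-row from the bottom-right corner, keeping only the current and previous layer.
-- outside the precondition, e.g. on pathsCount_DP(2, -1): A raises IndexError, B returns 0
import Mathlib
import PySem

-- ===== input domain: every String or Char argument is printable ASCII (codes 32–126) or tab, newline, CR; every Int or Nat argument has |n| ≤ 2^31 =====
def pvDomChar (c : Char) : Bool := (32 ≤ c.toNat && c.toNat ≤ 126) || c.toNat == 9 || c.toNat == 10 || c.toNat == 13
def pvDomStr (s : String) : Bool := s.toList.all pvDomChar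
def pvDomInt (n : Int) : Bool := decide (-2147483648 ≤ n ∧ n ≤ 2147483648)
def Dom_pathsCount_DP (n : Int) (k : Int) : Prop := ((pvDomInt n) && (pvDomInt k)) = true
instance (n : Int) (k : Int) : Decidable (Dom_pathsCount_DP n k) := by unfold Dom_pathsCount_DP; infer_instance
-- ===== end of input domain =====

-- B replaces the top-down memoized recursion by a bottom-up layered DP (alternative decomposition).

-- ===== PORT A =====
-- A's helper PathsForK_DP: the mutated 4-D memo table M (initialised to -1) is ported as a
-- threaded Std.HashMap keyed by (i, j, k-1, direction) with default -1 (exact on Pre_, where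
-- every k-1 index Python touches is in range; Python's IndexError for k < 0, n ≥ 2 is excluded
-- by Pre_), and the recursion carries a fuel bound strictly above the decreasing measure
-- (n-i)+(n-j), so the 0-fuel branch is never taken.
def pvPathsForK (fuel : Nat) (n i j k direction : Int) (M : Std.HashMap (Int × Int × Int × Int) Int) :
    Int × Std.HashMap (Int × Int × Int × Int) Int :=
  match fuel with
  | 0 => (0, M)  -- never reached: the caller passes fuel > (n-i)+(n-j), which strictly decreases
  | fuel + 1 =>
    if i ≥ n ∨ j ≥ n then (0, M)
    else if i = n - 1 ∧ j = n - 1 then (1, M)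
    else if k = 0 then
      (if (direction = 1 ∧ j = n - 1) ∨ (direction = 0 ∧ i = n - 1) then 1 else 0, M)
    else if M.getD (i, j, k - 1, direction) (-1) ≠ -1 then (M.getD (i, j, k - 1, direction) (-1), M)
    else if direction = 1 then
      let r1 := pvPathsForK fuel n (i + 1) j k direction M
      let r2 := pvPathsForK fuel n i (j + 1) (k - 1) 0 r1.2
      (r1.1 + r2.1, r2.2.insert (i, j, k - 1, direction) (r1.1 + r2.1))
    else
      let r1 := pvPathsForK fuel n i (j + 1) k direction M
      let r2 := pvPathsForK fuel n (i + 1) j (k - 1) 1 r1.2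
      (r1.1 + r2.1, r2.2.insert (i, j, k - 1, direction) (r1.1 + r2.1))

def pathsCount_DP (n : Int) (k : Int) : Int :=
  if k = 0 then 0
  else if k = 1 then 2
  else
    let k' := if k > 2 * n - 3 then 2 * n - 3 else k
    let r1 := pvPathsForK ((2 * n).toNat + 1) n 1 0 k' 1 (∅ : Std.HashMap (Int × Int × Int × Int) Int)
    let r2 := pvPathsForK ((2 * n).toNat + 1) n 0 1 k' 0 r1.2
    r1.1 + r2.1

-- ===== PORT B =====
-- Source B helpers: a table cell lookup (indices always in range in Source B), the k = 0 layer,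
-- one row built right-to-left, one layer built bottom-up, and the layer loop.
def pvGet2 (t : List (List Int)) (i j : Nat) : Int := (t.getD i []).getD j 0

def pvLayer0D (N : Nat) : List (List Int) :=
  (List.range N).map (fun _ => (List.range N).map (fun j => if j = N - 1 then 1 else 0))

def pvLayer0R (N : Nat) : List (List Int) :=
  (List.range N).map (fun i => (List.range N).map (fun _ => if i = N - 1 then 1 else 0))

-- builds the last t entries (columns N-t … N-1) of row i of the new layer; nD = already built rows i+1 …
def pvRow (N i : Nat) (nD D R : List (List Int)) : Nat → List Int × List Int
  | 0 => ([], [])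
  | t + 1 =>
    let acc := pvRow N i nD D R t
    let j := N - (t + 1)
    if i = N - 1 ∧ j = N - 1 then (1 :: acc.1, 1 :: acc.2)
    else
      let dv := (nD.headD []).getD j 0 + (if j + 1 < N then pvGet2 R i (j + 1) else 0)
      let rv := acc.2.headD 0 + (if i + 1 < N then pvGet2 D (i + 1) j else 0)
      (dv :: acc.1, rv :: acc.2)

-- builds the last t rows (rows N-t … N-1) of the new layer
def pvRows (N : Nat) (D R : List (List Int)) : Nat → List (List Int) × List (List Int)
  | 0 => ([], [])
  | t + 1 =>
    let acc := pvRows N D R t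
    let row := pvRow N (N - (t + 1)) acc.1 D R N
    (row.1 :: acc.1, row.2 :: acc.2)

def pvLayers (N : Nat) : Nat → List (List Int) × List (List Int)
  | 0 => (pvLayer0D N, pvLayer0R N)
  | c + 1 => let p := pvLayers N c; pvRows N p.1 p.2 N

def pathsCount_DP_alt (n : Int) (k : Int) : Int :=
  if k = 0 then 0
  else if k = 1 then 2
  else if n < 2 then 0
  else
    let k' := min k (2 * n - 3)
    let p := pvLayers n.toNat k'.toNat
    pvGet2 p.1 1 0 + pvGet2 p.2 0 1

-- ===== PRECONDITION & SPEC =====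
-- Pre_ excludes exactly the inputs where A raises IndexError (negative k with n ≥ 2:
-- the memo table's third dimension is empty and M[i][j][k-1] is out of range).
def Pre_pathsCount_DP (n : Int) (k : Int) : Prop := ¬ (2 ≤ n ∧ k < 0)
instance (n : Int) (k : Int) : Decidable (Pre_pathsCount_DP n k) := by
  unfold Pre_pathsCount_DP; infer_instance

def pvWitness_pathsCount_DP : Int × Int := (4, 3)

def Spec_pathsCount_DP (n : Int) (k : Int) (out : Int) : Prop := out = pathsCount_DP_alt n k
instance (n : Int) (k : Int) (out : Int) : Decidable (Spec_pathsCount_DP n k out) := by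
  unfold Spec_pathsCount_DP; infer_instance

-- ===== CLAIM (what is proved, stated in full; the proofs are below) =====
def Claim_equal_pathsCount_DP : Prop := ∀ (n : Int) (k : Int), Dom_pathsCount_DP n k →
  Pre_pathsCount_DP n k → Spec_pathsCount_DP n k (pathsCount_DP n k)

-- ===== LEMMAS AND PROOFS =====

-- the common specification: the pure (memo-free) recursion both programs compute
def pvF (n i j k direction : Int) : Int :=
  if i ≥ n ∨ j ≥ n then 0
  else if i = n - 1 ∧ j = n - 1 then 1
  else if k = 0 then
    (if (direction = 1 ∧ j = n - 1) ∨ (direction = 0 ∧ i = n - 1) then 1 else 0)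
  else if direction = 1 then pvF n (i + 1) j k direction + pvF n i (j + 1) (k - 1) 0
  else pvF n i (j + 1) k direction + pvF n (i + 1) j (k - 1) 1
termination_by ((n - i) + (n - j)).toNat
decreasing_by all_goals omega


-- small facts about pvF (the common spec recursion)
theorem pvF_oob (n i j k d : Int) (h : n ≤ i ∨ n ≤ j) : pvF n i j k d = 0 := by
  rw [pvF]; rw [if_pos]; exact h

theorem pvF_corner (n i j k d : Int) (h1 : i < n) (h2 : j < n) (hc : i = n - 1 ∧ j = n - 1) :
    pvF n i j k d = 1 := by
  have : ¬(i ≥ n ∨ j ≥ n) := by intro h; rcases h with h | h; exact absurd h1 (not_lt.mpr h); exact absurd h2 (not_lt.mpr h)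
  rw [pvF]; rw [if_neg this, if_pos hc]

theorem pvF_base_down (n i j : Int) (h1 : i < n) (h2 : j < n) :
    pvF n i j 0 1 = if j = n - 1 then 1 else 0 := by
  by_cases hc : i = n - 1 ∧ j = n - 1
  · rw [pvF_corner n i j 0 1 h1 h2 hc, if_pos hc.2]
  · rw [pvF]; rw [if_neg (by omega), if_neg hc, if_pos rfl]
    by_cases hj : j = n - 1
    · simp [hj]
    · simp [hj]

theorem pvF_base_right (n i j : Int) (h1 : i < n) (h2 : j < n) :
    pvF n i j 0 0 = if i = n - 1 then 1 else 0 := by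
  by_cases hc : i = n - 1 ∧ j = n - 1
  · rw [pvF_corner n i j 0 0 h1 h2 hc, if_pos hc.1]
  · rw [pvF]; rw [if_neg (by omega), if_neg hc, if_pos rfl]
    by_cases hi : i = n - 1
    · simp [hi]
    · simp [hi]

theorem pvF_rec_down (n i j k : Int) (h1 : i < n) (h2 : j < n)
    (hc : ¬(i = n - 1 ∧ j = n - 1)) (hk : k ≠ 0) :
    pvF n i j k 1 = pvF n (i + 1) j k 1 + pvF n i (j + 1) (k - 1) 0 := by
  rw [pvF]; rw [if_neg (by omega), if_neg hc, if_neg hk, if_pos rfl]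

theorem pvF_rec_right (n i j k : Int) (h1 : i < n) (h2 : j < n)
    (hc : ¬(i = n - 1 ∧ j = n - 1)) (hk : k ≠ 0) :
    pvF n i j k 0 = pvF n i (j + 1) k 0 + pvF n (i + 1) j (k - 1) 1 := by
  rw [pvF]; rw [if_neg (by omega), if_neg hc, if_neg hk, if_neg (by norm_num)]

def pvMemoInv (n : Int) (M : Std.HashMap (Int × Int × Int × Int) Int) : Prop :=
  ∀ i j k d v, M[((i, j, k, d) : Int × Int × Int × Int)]? = some v → v = pvF n i j (k + 1) d

theorem pvPathsForK_spec (n : Int) (μ : Nat) :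
    ∀ (i j k d : Int) (M : Std.HashMap (Int × Int × Int × Int) Int),
      ((n - i) + (n - j)).toNat < μ → pvMemoInv n M →
      (pvPathsForK μ n i j k d M).1 = pvF n i j k d ∧ pvMemoInv n (pvPathsForK μ n i j k d M).2 := by
  induction μ with
  | zero =>
    intro i j k d M hμ hInv
    exact absurd hμ (by omega)
  | succ μ ih =>
    intro i j k d M hμ hInv
    by_cases h1 : i ≥ n ∨ j ≥ n
    · have e : pvPathsForK (μ + 1) n i j k d M = (0, M) := by rw [pvPathsForK]; simp [h1]
      rw [e]
      exact ⟨(pvF_oob n i j k d h1).symm, hInv⟩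
    · have hin : i < n := by omega
      have hjn : j < n := by omega
      by_cases h2 : i = n - 1 ∧ j = n - 1
      · have e : pvPathsForK (μ + 1) n i j k d M = (1, M) := by rw [pvPathsForK]; simp [h2]
        rw [e]
        exact ⟨(pvF_corner n i j k d hin hjn h2).symm, hInv⟩
      · by_cases h3 : k = 0
        · subst h3
          have e : pvPathsForK (μ + 1) n i j 0 d M =
              (if (d = 1 ∧ j = n - 1) ∨ (d = 0 ∧ i = n - 1) then 1 else 0, M) := by
            rw [pvPathsForK]; simp [h1, h2]
          rw [e]
          refine ⟨?_, hInv⟩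
          rw [pvF]
          rw [if_neg h1, if_neg h2, if_pos rfl]
        · by_cases h4 : M.getD (i, j, k - 1, d) (-1) ≠ -1
          · have e : pvPathsForK (μ + 1) n i j k d M = (M.getD (i, j, k - 1, d) (-1), M) := by
              rw [pvPathsForK]; simp [h1, h2, h3, h4]
            rw [e]
            refine ⟨?_, hInv⟩
            rcases hM : M[((i, j, k - 1, d) : Int × Int × Int × Int)]? with _ | v
            · exfalso
              apply h4
              show M.getD (i, j, k - 1, d) (-1) = -1
              rw [Std.HashMap.getD_eq_getD_getElem?, hM]
              rfl
            · show M.getD (i, j, k - 1, d) (-1) = _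
              rw [Std.HashMap.getD_eq_getD_getElem?, hM]
              have hv := hInv i j (k - 1) d v hM
              have hk1 : k - 1 + 1 = k := by ring
              rw [hk1] at hv
              simpa using hv
          · have hμ1 : ((n - (i + 1)) + (n - j)).toNat < μ := by omega
            have hμ2 : ((n - i) + (n - (j + 1))).toNat < μ := by omega
            by_cases h5 : d = 1
            · subst h5
              obtain ⟨e1, inv1⟩ := ih (i + 1) j k 1 M hμ1 hInv
              obtain ⟨e2, inv2⟩ := ih i (j + 1) (k - 1) 0 (pvPathsForK μ n (i + 1) j k 1 M).2 hμ2 inv1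
              have e : pvPathsForK (μ + 1) n i j k 1 M =
                  ((pvPathsForK μ n (i + 1) j k 1 M).1 +
                     (pvPathsForK μ n i (j + 1) (k - 1) 0 (pvPathsForK μ n (i + 1) j k 1 M).2).1,
                   ((pvPathsForK μ n i (j + 1) (k - 1) 0 (pvPathsForK μ n (i + 1) j k 1 M).2).2).insert
                     (i, j, k - 1, 1)
                     ((pvPathsForK μ n (i + 1) j k 1 M).1 +
                      (pvPathsForK μ n i (j + 1) (k - 1) 0 (pvPathsForK μ n (i + 1) j k 1 M).2).1)) := by
                rw [pvPathsForK]; simp [h1, h2, h3, h4]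
              have hval : (pvPathsForK μ n (i + 1) j k 1 M).1 +
                  (pvPathsForK μ n i (j + 1) (k - 1) 0 (pvPathsForK μ n (i + 1) j k 1 M).2).1 =
                  pvF n i j k 1 := by
                rw [e1, e2, ← pvF_rec_down n i j k hin hjn h2 h3]
              rw [e]
              refine ⟨hval, ?_⟩
              intro i' j' k' d' v hget
              rw [Std.HashMap.getElem?_insert] at hget
              by_cases heq : (i, j, k - 1, (1 : Int)) = (i', j', k', d')
              · rw [if_pos (by exact beq_iff_eq.mpr heq), Option.some_inj] at hget
                simp only [Prod.ext_iff] at heq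
                obtain ⟨hi', hj', hk', hd'⟩ := heq
                subst hi'; subst hj'; subst hk'; subst hd'
                rw [← hget, hval]
                have hk1 : k - 1 + 1 = k := by ring
                rw [hk1]
              · rw [if_neg (by simp [heq])] at hget
                exact inv2 i' j' k' d' v hget
            · obtain ⟨e1, inv1⟩ := ih i (j + 1) k d M hμ2 hInv
              obtain ⟨e2, inv2⟩ := ih (i + 1) j (k - 1) 1 (pvPathsForK μ n i (j + 1) k d M).2 hμ1 inv1
              have e : pvPathsForK (μ + 1) n i j k d M =
                  ((pvPathsForK μ n i (j + 1) k d M).1 +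
                     (pvPathsForK μ n (i + 1) j (k - 1) 1 (pvPathsForK μ n i (j + 1) k d M).2).1,
                   ((pvPathsForK μ n (i + 1) j (k - 1) 1 (pvPathsForK μ n i (j + 1) k d M).2).2).insert
                     (i, j, k - 1, d)
                     ((pvPathsForK μ n i (j + 1) k d M).1 +
                      (pvPathsForK μ n (i + 1) j (k - 1) 1 (pvPathsForK μ n i (j + 1) k d M).2).1)) := by
                rw [pvPathsForK]; simp [h1, h2, h3, h4, h5]
              have hval : (pvPathsForK μ n i (j + 1) k d M).1 +
                  (pvPathsForK μ n (i + 1) j (k - 1) 1 (pvPathsForK μ n i (j + 1) k d M).2).1 =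
                  pvF n i j k d := by
                have hrec : pvF n i j k d = pvF n i (j + 1) k d + pvF n (i + 1) j (k - 1) 1 := by
                  conv_lhs => rw [pvF]
                  rw [if_neg h1, if_neg h2, if_neg h3, if_neg h5]
                rw [e1, e2, hrec]
              rw [e]
              refine ⟨hval, ?_⟩
              intro i' j' k' d' v hget
              rw [Std.HashMap.getElem?_insert] at hget
              by_cases heq : (i, j, k - 1, d) = (i', j', k', d')
              · rw [if_pos (by exact beq_iff_eq.mpr heq), Option.some_inj] at hget
                simp only [Prod.ext_iff] at heq
                obtain ⟨hi', hj', hk', hd'⟩ := heq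
                subst hi'; subst hj'; subst hk'; subst hd'
                rw [← hget, hval]
                have hk1 : k - 1 + 1 = k := by ring
                rw [hk1]
              · rw [if_neg (by simp [heq])] at hget
                exact inv2 i' j' k' d' v hget

-- B side
theorem pvLayer0_spec (n : Int) (N : Nat) (hN : (N : Int) = n) (i j : Nat) (hi : i < N) (hj : j < N) :
    pvGet2 (pvLayer0D N) i j = pvF n i j 0 1 ∧ pvGet2 (pvLayer0R N) i j = pvF n i j 0 0 := by
  have hin : (i : Int) < n := by omega
  have hjn : (j : Int) < n := by omega
  constructor
  · rw [pvF_base_down n i j hin hjn]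
    unfold pvGet2 pvLayer0D
    rw [PySem.List.getD_map_range _ _ _ _ hi, PySem.List.getD_map_range _ _ _ _ hj]
    by_cases h : j = N - 1
    · rw [if_pos h, if_pos (by omega)]
    · rw [if_neg h, if_neg (by omega)]
  · rw [pvF_base_right n i j hin hjn]
    unfold pvGet2 pvLayer0R
    rw [PySem.List.getD_map_range _ _ _ _ hi, PySem.List.getD_map_range _ _ _ _ hj]
    by_cases h : i = N - 1
    · rw [if_pos h, if_pos (by omega)]
    · rw [if_neg h, if_neg (by omega)]

theorem pvRow_spec (n : Int) (N : Nat) (hN : (N : Int) = n) (c : Nat) (i : Nat) (hi : i < N)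
    (nD D R : List (List Int))
    (hD : ∀ i' j' : Nat, i' < N → j' < N → pvGet2 D i' j' = pvF n i' j' c 1)
    (hR : ∀ i' j' : Nat, i' < N → j' < N → pvGet2 R i' j' = pvF n i' j' c 0)
    (hnD : ∀ j' : Nat, j' < N → (nD.headD []).getD j' 0 = pvF n ((i : Int) + 1) j' ((c : Int) + 1) 1) :
    ∀ t : Nat, t ≤ N →
      pvRow N i nD D R t =
        ((List.range t).map (fun s : Nat => pvF n i (((N - t + s : Nat) : Int)) ((c : Int) + 1) 1),
         (List.range t).map (fun s : Nat => pvF n i (((N - t + s : Nat) : Int)) ((c : Int) + 1) 0)) := by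
  intro t
  induction t with
  | zero => intro _; simp [pvRow]
  | succ t ih =>
    intro ht
    have hacc := ih (by omega)
    have hrange : ∀ (g : Nat → Int),
        (List.range (t + 1)).map g = g 0 :: (List.range t).map (fun s => g (s + 1)) := by
      intro g; rw [List.range_succ_eq_map]; simp [Function.comp]
    have hj : N - (t + 1) < N := by omega
    have hjn : ((N - (t + 1) : Nat) : Int) < n := by omega
    have hin : (i : Int) < n := by omega
    -- head value, D side
    have hd_head : (if i = N - 1 ∧ N - (t + 1) = N - 1 then (1 : Int)
          else (nD.headD []).getD (N - (t + 1)) 0 +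
            (if N - (t + 1) + 1 < N then pvGet2 R i (N - (t + 1) + 1) else 0)) =
        pvF n i (((N - (t + 1) : Nat) : Int)) ((c : Int) + 1) 1 := by
      by_cases hcc : i = N - 1 ∧ N - (t + 1) = N - 1
      · rw [if_pos hcc, pvF_corner n i _ _ _ hin hjn (by constructor <;> [omega; omega])]
      · rw [if_neg hcc, pvF_rec_down n i _ _ hin hjn (by omega) (by omega)]
        rw [hnD _ hj]
        congr 1
        by_cases hlt : N - (t + 1) + 1 < N
        · rw [if_pos hlt, hR i _ hi hlt]
          congr 2
          omega
        · rw [if_neg hlt, pvF_oob n _ _ _ _ (by right; omega)]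
    -- head value, R side
    have hr_head : (if i = N - 1 ∧ N - (t + 1) = N - 1 then (1 : Int)
          else ((List.range t).map
              (fun s : Nat => pvF n i (((N - t + s : Nat) : Int)) ((c : Int) + 1) 0)).headD 0 +
            (if i + 1 < N then pvGet2 D (i + 1) (N - (t + 1)) else 0)) =
        pvF n i (((N - (t + 1) : Nat) : Int)) ((c : Int) + 1) 0 := by
      by_cases hcc : i = N - 1 ∧ N - (t + 1) = N - 1
      · rw [if_pos hcc, pvF_corner n i _ _ _ hin hjn (by constructor <;> [omega; omega])]
      · rw [if_neg hcc, pvF_rec_right n i _ _ hin hjn (by omega) (by omega)]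
        congr 1
        · cases t with
          | zero =>
            simp only [List.range_zero, List.map_nil, List.headD_nil]
            rw [pvF_oob n i _ _ _ (by right; omega)]
          | succ t' =>
            rw [List.range_succ_eq_map]
            simp only [List.map_cons, List.headD_cons]
            congr 2
            push_cast; omega
        · by_cases hlt : i + 1 < N
          · rw [if_pos hlt, hD (i + 1) _ hlt hj]
            congr 2
            omega
          · rw [if_neg hlt, pvF_oob n _ _ _ _ (by left; omega)]
    -- assemble both components
    rw [pvRow, hacc]
    rw [hrange (fun s : Nat => pvF n i (((N - (t + 1) + s : Nat) : Int)) ((c : Int) + 1) 1),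
        hrange (fun s : Nat => pvF n i (((N - (t + 1) + s : Nat) : Int)) ((c : Int) + 1) 0)]
    have hshift : ∀ s : Nat, N - (t + 1) + (s + 1) = N - t + s := by omega
    simp only [Nat.add_zero, hshift]
    have hN1 : N - (t + 1) + 1 = N - t := by omega
    simp only [hN1] at hd_head ⊢
    rw [← hd_head, ← hr_head]
    split_ifs <;> rfl

theorem pvRows_spec (n : Int) (N : Nat) (hN : (N : Int) = n) (c : Nat) (D R : List (List Int))
    (hD : ∀ i' j' : Nat, i' < N → j' < N → pvGet2 D i' j' = pvF n i' j' c 1)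
    (hR : ∀ i' j' : Nat, i' < N → j' < N → pvGet2 R i' j' = pvF n i' j' c 0) :
    ∀ t : Nat, t ≤ N →
      pvRows N D R t =
        ((List.range t).map (fun s : Nat =>
            (List.range N).map (fun j : Nat => pvF n (((N - t + s : Nat) : Int)) j ((c : Int) + 1) 1)),
         (List.range t).map (fun s : Nat =>
            (List.range N).map (fun j : Nat => pvF n (((N - t + s : Nat) : Int)) j ((c : Int) + 1) 0))) := by
  intro t
  induction t with
  | zero => intro _; simp [pvRows]
  | succ t ih =>
    intro ht
    have hacc := ih (by omega)
    have hi : N - (t + 1) < N := by omega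
    have hnD : ∀ j' : Nat, j' < N →
        (((pvRows N D R t).1).headD []).getD j' 0 =
          pvF n (((N - (t + 1) : Nat) : Int) + 1) j' ((c : Int) + 1) 1 := by
      intro j' hj'
      rw [hacc]
      cases t with
      | zero =>
        simp only [List.range_zero, List.map_nil, List.headD_nil, List.getD_nil]
        rw [pvF_oob n _ _ _ _ (by left; omega)]
      | succ t' =>
        rw [List.range_succ_eq_map]
        simp only [List.map_cons, List.headD_cons]
        rw [PySem.List.getD_map_range _ _ _ _ hj']
        congr 2
        push_cast; omega
    have hrow := pvRow_spec n N hN c (N - (t + 1)) hi (pvRows N D R t).1 D R hD hR hnD N (le_refl N)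
    have hrange : ∀ (g : Nat → List Int),
        (List.range (t + 1)).map g = g 0 :: (List.range t).map (fun s => g (s + 1)) := by
      intro g; rw [List.range_succ_eq_map]; simp [Function.comp]
    rw [pvRows, hrow, hacc]
    rw [hrange (fun s : Nat =>
          (List.range N).map (fun j : Nat => pvF n (((N - (t + 1) + s : Nat) : Int)) j ((c : Int) + 1) 1)),
        hrange (fun s : Nat =>
          (List.range N).map (fun j : Nat => pvF n (((N - (t + 1) + s : Nat) : Int)) j ((c : Int) + 1) 0))]
    have hshift : ∀ s : Nat, N - (t + 1) + (s + 1) = N - t + s := by omega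
    have hNN : ∀ s : Nat, N - N + s = s := by omega
    simp only [Nat.add_zero, hshift, hNN]

theorem pvLayers_spec (n : Int) (N : Nat) (hN : (N : Int) = n) (c : Nat) (i j : Nat)
    (hi : i < N) (hj : j < N) :
    pvGet2 (pvLayers N c).1 i j = pvF n i j c 1 ∧ pvGet2 (pvLayers N c).2 i j = pvF n i j c 0 := by
  induction c generalizing i j with
  | zero =>
    have h := pvLayer0_spec n N hN i j hi hj
    simpa [pvLayers] using h
  | succ c ih =>
    have hD : ∀ i' j' : Nat, i' < N → j' < N →
        pvGet2 (pvLayers N c).1 i' j' = pvF n i' j' c 1 := fun i' j' h1 h2 => (ih i' j' h1 h2).1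
    have hR : ∀ i' j' : Nat, i' < N → j' < N →
        pvGet2 (pvLayers N c).2 i' j' = pvF n i' j' c 0 := fun i' j' h1 h2 => (ih i' j' h1 h2).2
    have hrows := pvRows_spec n N hN c (pvLayers N c).1 (pvLayers N c).2 hD hR N (le_refl N)
    have hNN : ∀ s : Nat, N - N + s = s := by omega
    have hcast : ((c : Int) + 1) = ((c + 1 : Nat) : Int) := by push_cast; ring
    constructor
    · show pvGet2 (pvRows N (pvLayers N c).1 (pvLayers N c).2 N).1 i j = _
      rw [hrows]
      unfold pvGet2
      rw [PySem.List.getD_map_range _ _ _ _ hi, PySem.List.getD_map_range _ _ _ _ hj]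
      rw [hNN, hcast]
    · show pvGet2 (pvRows N (pvLayers N c).1 (pvLayers N c).2 N).2 i j = _
      rw [hrows]
      unfold pvGet2
      rw [PySem.List.getD_map_range _ _ _ _ hi, PySem.List.getD_map_range _ _ _ _ hj]
      rw [hNN, hcast]

-- ===== VERDICT (by name: the statement is the Claim_ definition above) =====
theorem pathsCount_DP_spec : Claim_equal_pathsCount_DP := by
  intro n k _ hpre
  unfold Spec_pathsCount_DP pathsCount_DP pathsCount_DP_alt
  by_cases hk0 : k = 0
  · simp [hk0]
  · by_cases hk1 : k = 1
    · simp [hk1]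
    · simp only [if_neg hk0, if_neg hk1]
      have hInv0 : pvMemoInv n (∅ : Std.HashMap (Int × Int × Int × Int) Int) := by
        intro i j kk d v h
        rw [Std.HashMap.getElem?_empty] at h
        cases h
      obtain ⟨e1, inv1⟩ := pvPathsForK_spec n ((2 * n).toNat + 1) 1 0
        (if k > 2 * n - 3 then 2 * n - 3 else k) 1 (∅ : Std.HashMap (Int × Int × Int × Int) Int) (by omega) hInv0
      obtain ⟨e2, _⟩ := pvPathsForK_spec n ((2 * n).toNat + 1) 0 1
        (if k > 2 * n - 3 then 2 * n - 3 else k) 0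
        (pvPathsForK ((2 * n).toNat + 1) n 1 0 (if k > 2 * n - 3 then 2 * n - 3 else k) 1 (∅ : Std.HashMap (Int × Int × Int × Int) Int)).2
        (by omega) inv1
      show _ + _ = _
      rw [e1, e2]
      by_cases hn2 : n < 2
      · rw [if_pos hn2]
        rw [pvF_oob n 1 0 _ _ (by left; omega), pvF_oob n 0 1 _ _ (by right; omega)]
        norm_num
      · rw [if_neg hn2]
        have hk2 : 2 ≤ k := by
          rcases lt_or_ge k 0 with h | h
          · exact absurd ⟨by omega, h⟩ hpre
          · omega
        have hmin : min k (2 * n - 3) = (if k > 2 * n - 3 then 2 * n - 3 else k) := by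
          rw [min_def]; split_ifs <;> omega
        have hk'pos : (0 : Int) ≤ (if k > 2 * n - 3 then 2 * n - 3 else k) := by
          split_ifs <;> omega
        have hN : ((n.toNat : Int)) = n := by omega
        have hK : (((min k (2 * n - 3)).toNat : Int)) = (if k > 2 * n - 3 then 2 * n - 3 else k) := by
          rw [← hmin]; omega
        have h1 := (pvLayers_spec n n.toNat hN (min k (2 * n - 3)).toNat 1 0
          (by omega) (by omega)).1
        have h2 := (pvLayers_spec n n.toNat hN (min k (2 * n - 3)).toNat 0 1
          (by omega) (by omega)).2
        rw [hK] at h1 h2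
        show _ = pvGet2 (pvLayers n.toNat (min k (2 * n - 3)).toNat).1 1 0 +
          pvGet2 (pvLayers n.toNat (min k (2 * n - 3)).toNat).2 0 1
        rw [h1, h2]
        norm_num
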